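-- pv_equiv track=rewrite | github.com/danceos/dosek | generator/analysis/DominanceAnalysis.py | __reverse_tree
-- ===== SOURCE A (Python) =====
-- def __reverse_tree(_tree):
--     tree = {}
--     root = None
--     for _from, _to in _tree.items():
--         tree.setdefault(_from, list())
--
--         if _to != None:
--             tree.setdefault(_to, list())
--             tree[_to].append(_from)
--         else:
--             assert root == None
--             root = _from
--     return root, tree
-- ===== SOURCE B (Python) =====
-- def __reverse_tree(_tree):
--     items = list(_tree.items())
--     roots = [f for f, t in items if t is None]
--     assert len(roots) <= 1
--     root = roots[0] if roots else None
--     keys = list(dict.fromkeys(k for f, t in items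
--                               for k in ([f] if t is None else [f, t])))
--     tree = {k: [f for f, t in items if t == k] for k in keys}
--     return root, tree
-- ===== Notes on version B (the rewrite author's own statement) =====
-- stated objective: alternative
-- what changed: Replaces the single fused mutate-a-dict loop by three independent passes: the root is read off by filtering for the None-parent entry, the key order is the first-occurrence dedup of the emitted key stream, and each children list is a per-key comprehension over the items instead of in-place appends.
import Mathlib
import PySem

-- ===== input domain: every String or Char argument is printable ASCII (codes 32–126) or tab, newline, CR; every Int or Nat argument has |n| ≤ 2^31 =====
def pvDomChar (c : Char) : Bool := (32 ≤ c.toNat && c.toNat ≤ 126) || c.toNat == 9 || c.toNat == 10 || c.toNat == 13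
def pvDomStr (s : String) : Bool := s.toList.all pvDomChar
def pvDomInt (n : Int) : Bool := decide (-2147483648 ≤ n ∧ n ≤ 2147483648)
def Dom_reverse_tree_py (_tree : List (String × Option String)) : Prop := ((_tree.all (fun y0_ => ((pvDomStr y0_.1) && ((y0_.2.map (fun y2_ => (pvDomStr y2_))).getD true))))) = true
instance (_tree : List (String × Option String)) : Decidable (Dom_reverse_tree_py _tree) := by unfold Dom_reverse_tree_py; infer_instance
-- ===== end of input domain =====

-- B replaces A's single fused dict-mutating loop by three independent passes (a root filter,
-- a dedup of the emitted key stream for key order, a per-key children comprehension);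
-- objective: alternative structure, same results on Pre_ (A's assert excluded).


-- ===== PORT A =====
-- one loop iteration of A: setdefault the from-key, then either append to the parent's
-- children list or record the root (the 'assert root == None' only raises; Pre_ excludes that)
def revStep (st : Option String × PySem.Dict String (List String))
    (p : String × Option String) : Option String × PySem.Dict String (List String) :=
  let tree := st.2.setdefault p.1 []
  match p.2 with
  | some t => (st.1, (tree.setdefault t []).modify t [] (fun l => l ++ [p.1]))
  | none => (some p.1, tree)

def reverse_tree_py (_tree : List (String × Option String)) :
    Option String × (List (String × List String)) :=
  let st := ((PySem.Dict.ofList _tree).items).foldl revStep (none, PySem.Dict.empty)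
  (st.1, st.2.items)

-- ===== PORT B =====
def reverse_tree_py_alt (_tree : List (String × Option String)) :
    Option String × (List (String × List String)) :=
  let items := (PySem.Dict.ofList _tree).items
  let roots := (items.filter (fun p => p.2 == none)).map (·.1)
  let root := roots.head?
  let keys := PySem.List.dedup (items.flatMap (fun p =>
    match p.2 with | none => [p.1] | some t => [p.1, t]))
  let tree := keys.map (fun k => (k, (items.filter (fun p => p.2 == some k)).map (·.1)))
  (root, tree)

-- ===== PRECONDITION & SPEC =====
-- Pre_ excludes exactly the inputs on which A's 'assert root == None' raises AssertionError:
-- dicts with more than one node whose parent is None (B's own assert raises there too).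
def Pre_reverse_tree_py (_tree : List (String × Option String)) : Prop :=
  ((PySem.Dict.ofList _tree).items.filter (fun p => p.2 == none)).length ≤ 1
instance (_tree : List (String × Option String)) : Decidable (Pre_reverse_tree_py _tree) := by
  unfold Pre_reverse_tree_py; infer_instance
def pvWitness_reverse_tree_py : (List (String × Option String)) :=
  [("a", none), ("b", some "a"), ("c", some "a")]
def Spec_reverse_tree_py (_tree : List (String × Option String)) (out : Option String × (List (String × List String))) : Prop := out = reverse_tree_py_alt _tree
instance (_tree : List (String × Option String)) (out : Option String × (List (String × List String))) : Decidable (Spec_reverse_tree_py _tree out) := by unfold Spec_reverse_tree_py; infer_instance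

-- ===== CLAIM (what is proved, stated in full; the proofs are below) =====
def Claim_equal_reverse_tree_py : Prop := ∀ (_tree : List (String × Option String)), Dom_reverse_tree_py _tree → Pre_reverse_tree_py _tree → Spec_reverse_tree_py _tree (reverse_tree_py _tree)

-- ===== LEMMAS AND PROOFS =====

-- the key stream A's loop setdefaults, in iteration order
def emit (p : String × Option String) : List String :=
  match p.2 with | none => [p.1] | some t => [p.1, t]

-- children of k collected by A = froms whose parent is k, in items order
def ch (l : List (String × Option String)) (k : String) : List String :=
  (l.filter (fun p => p.2 == some k)).map (·.1)

-- the dict A has built after processing l, described the way B computes it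
def treeOf (l : List (String × Option String)) : PySem.Dict String (List String) :=
  PySem.Dict.mk ((PySem.Set.ofList (l.flatMap emit)).map (fun k => (k, ch l k)))

-- A's root variable after processing l: the LAST from with a None parent
def rootOf (l : List (String × Option String)) : Option String :=
  ((l.filter (fun p => p.2 == none)).map (·.1)).getLast?

theorem keys_treeOf (l : List (String × Option String)) :
    (treeOf l).keys = PySem.Set.ofList (l.flatMap emit) := by
  simp only [treeOf, PySem.Dict.keys, List.map_map]
  have h : ((fun x : String × List String => x.1) ∘ fun k => (k, ch l k)) = id := rfl
  rw [h, List.map_id]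

theorem nodup_keys_treeOf (l : List (String × Option String)) :
    (treeOf l).keys.Nodup := by
  rw [keys_treeOf]; exact PySem.Set.nodup_ofList _

theorem ch_nil_of_not_mem (l : List (String × Option String)) (k : String)
    (h : k ∉ l.flatMap emit) : ch l k = [] := by
  simp only [ch, List.map_eq_nil_iff, List.filter_eq_nil_iff]
  intro p hp hbe
  apply h
  simp only [List.mem_flatMap]
  refine ⟨p, hp, ?_⟩
  have h2 : p.2 = some k := by simpa using hbe
  simp [emit, h2]

theorem getD_treeOf (l : List (String × Option String)) (k : String) :
    (treeOf l).getD k [] = ch l k := by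
  by_cases h : k ∈ l.flatMap emit
  · have hk : k ∈ PySem.Set.ofList (l.flatMap emit) := (PySem.Set.mem_ofList _ _).2 h
    have hmem : (k, ch l k) ∈ (treeOf l).items := List.mem_map_of_mem hk
    exact PySem.Dict.getD_of_mem_items _ hmem (nodup_keys_treeOf l) []
  · have hnc : (treeOf l).contains k = false := by
      rw [← Bool.not_eq_true, PySem.Dict.contains_iff_mem_keys, keys_treeOf,
        PySem.Set.mem_ofList]
      exact h
    rw [PySem.Dict.getD_of_not_contains _ _ hnc, ch_nil_of_not_mem l k h]

theorem getD_setdefault_nil (d : PySem.Dict String (List String)) (a k : String) :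
    (d.setdefault a []).getD k [] = d.getD k [] := by
  by_cases h : k = a
  · subst h; exact PySem.Dict.getD_setdefault_self d k [] []
  · rw [PySem.Dict.getD_eq_get?_getD, PySem.Dict.get?_setdefault_of_ne d [] h,
      ← PySem.Dict.getD_eq_get?_getD]

theorem ch_append (l : List (String × Option String)) (p : String × Option String)
    (k : String) :
    ch (l ++ [p]) k = ch l k ++ if p.2 = some k then [p.1] else [] := by
  simp only [ch, List.filter_append, List.map_append]
  congr 1
  by_cases h : p.2 = some k <;> simp [h]

theorem keys_step (l : List (String × Option String)) (x : String × Option String)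
    (r : Option String) :
    (revStep (r, treeOf l) x).2.keys = PySem.Set.ofList ((l ++ [x]).flatMap emit) := by
  obtain ⟨f, t⟩ := x
  have hmem : ∀ (d : PySem.Dict String (List String)) (a : String),
      d.contains a = decide (a ∈ d.keys) := by
    intro d a
    by_cases h : a ∈ d.keys
    · simp [h, (PySem.Dict.contains_iff_mem_keys d a).2 h]
    · simp only [h, decide_false]
      rw [← Bool.not_eq_true]
      simpa [PySem.Dict.contains_iff_mem_keys] using h
  cases t with
  | none =>
    simp only [revStep, List.flatMap_append]
    rw [PySem.Dict.keys_setdefault, hmem, keys_treeOf]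
    simp only [emit, List.flatMap_cons, List.flatMap_nil, List.append_nil,
      PySem.Set.ofList_append_singleton, PySem.Set.add_eq_ite]
    simp only [decide_eq_true_eq]
  | some c =>
    simp only [revStep]
    rw [PySem.Dict.keys_modify]
    have hc : (((treeOf l).setdefault f []).setdefault c []).contains c = true := by
      simp [PySem.Dict.contains_setdefault]
    rw [PySem.Dict.keys_insert_of_contains _ _ hc]
    rw [PySem.Dict.keys_setdefault, hmem, PySem.Dict.keys_setdefault, hmem, keys_treeOf]
    simp only [List.flatMap_append, emit, List.flatMap_cons, List.flatMap_nil,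
      List.append_nil]
    rw [show ([f, c] : List String) = [f] ++ [c] from rfl, ← List.append_assoc,
      PySem.Set.ofList_append_singleton, PySem.Set.ofList_append_singleton,
      PySem.Set.add_eq_ite, PySem.Set.add_eq_ite]
    simp only [decide_eq_true_eq]

theorem getD_step (l : List (String × Option String)) (x : String × Option String)
    (r : Option String) (k : String) :
    (revStep (r, treeOf l) x).2.getD k [] = ch (l ++ [x]) k := by
  obtain ⟨f, t⟩ := x
  cases t with
  | none =>
    simp only [revStep]
    rw [getD_setdefault_nil, getD_treeOf, ch_append]
    simp
  | some c =>
    simp only [revStep]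
    rw [PySem.Dict.getD_modify]
    rw [getD_setdefault_nil, getD_setdefault_nil, getD_setdefault_nil, getD_setdefault_nil,
      getD_treeOf, getD_treeOf, ch_append]
    by_cases h : k = c
    · subst h; simp
    · have h2 : ¬ (some c = some k) := fun hh => h (Option.some.inj hh).symm
      simp [h, h2]

theorem step_tree (l : List (String × Option String)) (x : String × Option String)
    (r : Option String) :
    (revStep (r, treeOf l) x).2 = treeOf (l ++ [x]) := by
  apply PySem.Dict.ext
  have hk : (revStep (r, treeOf l) x).2.keys = (treeOf (l ++ [x])).keys := by
    rw [keys_step, keys_treeOf]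
  have hnd : (revStep (r, treeOf l) x).2.keys.Nodup := by
    rw [hk]; exact nodup_keys_treeOf _
  rw [PySem.Dict.items_eq_map_keys _ hnd [],
    PySem.Dict.items_eq_map_keys _ (nodup_keys_treeOf (l ++ [x])) [], hk]
  apply List.map_congr_left
  intro k _
  rw [getD_step, getD_treeOf]

theorem step_root (l : List (String × Option String)) (x : String × Option String)
    (d : PySem.Dict String (List String)) :
    (revStep (rootOf l, d) x).1 = rootOf (l ++ [x]) := by
  obtain ⟨f, t⟩ := x
  cases t with
  | none => simp [revStep, rootOf, List.filter_append]
  | some c => simp [revStep, rootOf, List.filter_append]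

theorem fold_revStep_eq (l : List (String × Option String)) :
    l.foldl revStep (none, PySem.Dict.empty) = (rootOf l, treeOf l) := by
  induction l using List.reverseRecOn with
  | nil =>
    have h1 : rootOf [] = none := rfl
    have h2 : treeOf [] = PySem.Dict.empty := rfl
    simp [h1, h2]
  | append_singleton p x ih =>
    rw [List.foldl_append, List.foldl_cons, List.foldl_nil, ih]
    have := step_tree p x (rootOf p)
    have := step_root p x (treeOf p)
    ext : 1 <;> simp_all

theorem getLast?_eq_head?_of_len_le_one {α : Type} (xs : List α) (h : xs.length ≤ 1) :
    xs.getLast? = xs.head? := by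
  match xs with
  | [] => rfl
  | [a] => rfl
  | a :: b :: rest => simp at h

-- ===== VERDICT (by name: the statement is the Claim_ definition above) =====
theorem reverse_tree_py_spec : Claim_equal_reverse_tree_py := by
  intro _tree _ hpre
  simp only [Spec_reverse_tree_py, reverse_tree_py, reverse_tree_py_alt]
  rw [fold_revStep_eq]
  apply Prod.ext
  · simp only [rootOf]
    apply getLast?_eq_head?_of_len_le_one
    rw [List.length_map]
    exact hpre
  · simp only [treeOf, PySem.List.dedup_eq_ofList]
    rfl
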